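-- pv_equiv track=rewrite | github.com/sunbyte16/100-Day-Coding-Sprint | Day-8/Golden Value.py | golden_value
-- ===== SOURCE A (Python) =====
-- def golden_value(arr):
--     n = len(arr)
--     MAX_BIT = 31  # FIX 1: support large values
--     answer = 0
--
--     for b in range(MAX_BIT):
--         # count[parity][bit]
--         count = [[0, 0], [0, 0]]
--
--         # empty prefix
--         count[0][0] = 1
--
--         pref = 0
--         odd_sum = 0
--         even_sum = 0
--
--         for i in range(n):
--             pref ^= arr[i]
--             parity = (i + 1) & 1
--             bit = (pref >> b) & 1
--
--             # Odd-length → same parity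
--             odd_sum += count[parity][1 - bit]
--
--             # Even-length → different parity
--             even_sum += count[1 - parity][1 - bit]
--
--             count[parity][bit] += 1
--
--         # FIX 2: NO absolute value
--         answer += (even_sum - odd_sum) * (1 << b)
--
--     return answer
-- ===== SOURCE B (Python) =====
-- def golden_value(arr):
--     n = len(arr)
--     mask = (1 << 31) - 1
--     answer = 0
--     for i in range(n):
--         x = 0
--         for j in range(i, n):
--             x ^= arr[j]
--             if (j - i + 1) % 2 == 1:
--                 answer += x & mask
--             else:
--                 answer -= x & mask
--     return answer
-- ===== Notes on version B (the rewrite author's own statement) =====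
-- stated objective: simpler
-- what changed: A makes 31 per-bit passes maintaining prefix-xor parity/bit counters and reassembles the answer bit by bit; B is a direct double loop over all contiguous subarrays that adds the running XOR masked to the low 31 bits for odd lengths and subtracts it for even lengths.
import Mathlib
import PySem

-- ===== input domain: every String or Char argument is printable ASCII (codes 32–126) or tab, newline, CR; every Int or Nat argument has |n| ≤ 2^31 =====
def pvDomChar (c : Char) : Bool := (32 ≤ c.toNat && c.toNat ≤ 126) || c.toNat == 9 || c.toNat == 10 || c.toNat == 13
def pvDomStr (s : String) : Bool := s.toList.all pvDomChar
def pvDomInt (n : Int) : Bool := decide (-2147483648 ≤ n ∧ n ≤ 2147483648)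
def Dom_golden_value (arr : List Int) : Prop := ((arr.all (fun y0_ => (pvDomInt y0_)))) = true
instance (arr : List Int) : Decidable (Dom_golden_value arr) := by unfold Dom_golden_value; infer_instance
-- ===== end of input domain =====

-- B replaces A's per-bit counting pass (for each of 31 bits, one scan with prefix-xor parity counters)
-- by a plain double loop over all contiguous subarrays, adding/subtracting the running XOR masked to
-- the low 31 bits; objective: simpler (B is not faster — A is O(31·n), B is O(n²)).

-- ===== PORT A =====
def pvCGet (c : (Int × Int) × (Int × Int)) (p v : Int) : Int :=
  if p = 0 then (if v = 0 then c.1.1 else c.1.2) else (if v = 0 then c.2.1 else c.2.2)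

def pvCInc (c : (Int × Int) × (Int × Int)) (p v : Int) : (Int × Int) × (Int × Int) :=
  if p = 0 then (if v = 0 then ((c.1.1 + 1, c.1.2), c.2) else ((c.1.1, c.1.2 + 1), c.2))
  else (if v = 0 then (c.1, (c.2.1 + 1, c.2.2)) else (c.1, (c.2.1, c.2.2 + 1)))

def pvStepA (arr : List Int) (b : Int)
    (st : ((Int × Int) × (Int × Int)) × Int × Int × Int) (i : Int) :
    ((Int × Int) × (Int × Int)) × Int × Int × Int :=
  let pref := PySem.Int.bxor st.2.1 (PySem.List.pyGetD arr i 0)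
  let parity := PySem.Int.band (i + 1) 1
  let bit := PySem.Int.band (pref >>> b.toNat) 1
  let odd := st.2.2.1 + pvCGet st.1 parity (1 - bit)
  let even := st.2.2.2 + pvCGet st.1 (1 - parity) (1 - bit)
  (pvCInc st.1 parity bit, pref, odd, even)

def pvInnerA (arr : List Int) (b : Int) : ((Int × Int) × (Int × Int)) × Int × Int × Int :=
  (PySem.List.pyRange 0 arr.length 1).foldl (pvStepA arr b) (((1, 0), (0, 0)), 0, 0, 0)

def golden_value (arr : List Int) : Int :=
  (PySem.List.pyRange 0 31 1).foldl
    (fun answer b =>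
      answer + ((pvInnerA arr b).2.2.2 - (pvInnerA arr b).2.2.1) * ((1:Int) <<< b.toNat)) 0

-- ===== PORT B =====
def pvMaskB : Int := (1 <<< 31) - 1

def pvStepB (arr : List Int) (i : Int) (st : Int × Int) (j : Int) : Int × Int :=
  let x := PySem.Int.bxor st.1 (PySem.List.pyGetD arr j 0)
  (x, if PySem.Int.mod (j - i + 1) 2 = 1 then st.2 + PySem.Int.band x pvMaskB
      else st.2 - PySem.Int.band x pvMaskB)

def golden_value_alt (arr : List Int) : Int :=
  (PySem.List.pyRange 0 arr.length 1).foldl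
    (fun answer i =>
      ((PySem.List.pyRange i arr.length 1).foldl (pvStepB arr i) (0, answer)).2) 0

-- ===== PRECONDITION & SPEC =====
def Spec_golden_value (arr : List Int) (out : Int) : Prop := out = golden_value_alt arr
instance (arr : List Int) (out : Int) : Decidable (Spec_golden_value arr out) := by unfold Spec_golden_value; infer_instance

-- ===== CLAIM (what is proved, stated in full; the proofs are below) =====
def Claim_equal_golden_value : Prop := ∀ (arr : List Int), Dom_golden_value arr → Spec_golden_value arr (golden_value arr)

-- ===== LEMMAS AND PROOFS =====
theorem pvBxor_eq_xor (a b : Int) : PySem.Int.bxor a b = Int.xor a b := by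
  rcases a with m | m <;> rcases b with n | n <;> simp [PySem.Int.bxor, Int.xor] <;> omega

def pvBit (x : Int) (b : Nat) : Int := if x.testBit b then 1 else 0

theorem pvShift_ofNat (m b : Nat) : (Int.ofNat m) >>> b = ((m >>> b : Nat) : Int) :=
  (Int.natCast_shiftRight m b).symm

theorem pvShift_negSucc (m b : Nat) : (Int.negSucc m) >>> b = Int.negSucc (m >>> b) := by
  have := Int.shiftRight_negSucc m b
  rwa [Int.shiftRight_natCast_right] at this

theorem pvBand_shift_one (x : Int) (b : Nat) :
    PySem.Int.band (x >>> b) 1 = pvBit x b := by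
  rw [PySem.Int.band_one, PySem.Int.mod_eq_emod_of_pos (by norm_num)]
  rcases x with m | m
  · rw [pvShift_ofNat, pvBit,
      show (Int.ofNat m).testBit b = m.testBit b from rfl,
      Nat.testBit_eq_decide_div_mod_eq, ← Nat.shiftRight_eq_div_pow]
    rcases Nat.mod_two_eq_zero_or_one (m >>> b) with h | h
    · rw [h, if_neg (by decide)]; omega
    · rw [h, if_pos (by decide)]; omega
  · rw [pvShift_negSucc, pvBit,
      show (Int.negSucc m).testBit b = !(m.testBit b) from rfl,
      Nat.testBit_eq_decide_div_mod_eq, ← Nat.shiftRight_eq_div_pow,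
      Int.negSucc_eq]
    rcases Nat.mod_two_eq_zero_or_one (m >>> b) with h | h
    · rw [h, if_pos (by decide)]; omega
    · rw [h, if_neg (by decide)]; omega

theorem pvBit_bxor (x y : Int) (b : Nat) :
    pvBit (PySem.Int.bxor x y) b = if pvBit x b = pvBit y b then 0 else 1 := by
  rw [pvBxor_eq_xor]
  simp only [pvBit, Int.testBit_lxor]
  rcases Bool.eq_false_or_eq_true (x.testBit b) with hx | hx <;>
    rcases Bool.eq_false_or_eq_true (y.testBit b) with hy | hy <;> simp [hx, hy]

theorem pvNeg_emod (K a : Int) (hK : 0 < K) : (-a - 1) % K = K - 1 - a % K := by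
  have h1 : -a - 1 = (-(a % K) - 1) + K * (-(a / K)) := by
    have h := Int.emod_add_mul_ediv a K
    linear_combination h
  have hr0 : 0 ≤ a % K := Int.emod_nonneg a (by omega)
  have hr1 : a % K < K := Int.emod_lt_of_pos a hK
  have h2 : -(a % K) - 1 = (K - 1 - a % K) + K * (-1) := by ring
  rw [h1, Int.add_mul_emod_self_left, h2, Int.add_mul_emod_self_left,
    Int.emod_eq_of_lt (by omega) (by omega)]

theorem pvBand_mask_emod (x : Int) (w : Nat) :
    PySem.Int.band x ((2:Int) ^ w - 1) = x % ((2:Int) ^ w) := by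
  have h2 : (1:Nat) ≤ 2 ^ w := Nat.one_le_two_pow
  have hpow : ((2 ^ w : Nat) : Int) = (2:Int) ^ w := by push_cast; ring
  have h2i : (1:Int) ≤ 2 ^ w := by omega
  have hb : (0:Int) ≤ 2 ^ w - 1 := by omega
  have ht : ((2:Int) ^ w - 1).toNat = 2 ^ w - 1 := by omega
  have hmc : ∀ m : Nat, ((m % 2 ^ w : Nat) : Int) = (m : Int) % (2:Int) ^ w := by
    intro m; push_cast; ring
  rcases x with m | m
  · rw [show Int.ofNat m = (m : Int) from rfl, PySem.Int.band_of_nonneg (by positivity) hb]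
    rw [Int.toNat_natCast, ht, Nat.and_two_pow_sub_one_eq_mod, hmc]
  · have hneg : ¬ (0 ≤ Int.negSucc m) := by rw [Int.negSucc_eq]; omega
    rw [PySem.Int.band, if_neg hneg, if_pos hb]
    have h1 : (-(Int.negSucc m) - 1).toNat = m := by rw [Int.negSucc_eq]; omega
    rw [h1, ht, Nat.and_comm, Nat.and_two_pow_sub_one_eq_mod]
    rw [show Int.negSucc m = -(m:Int) - 1 from by rw [Int.negSucc_eq]; ring]
    rw [pvNeg_emod _ _ (by omega)]
    have := Nat.mod_lt m (show 0 < 2 ^ w by omega)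
    have h3 := hmc m
    omega

theorem pvEmod_two_pow_succ (x : Int) (w : Nat) :
    x % 2 ^ (w + 1) = x % 2 ^ w + ((x >>> w) % 2) * 2 ^ w := by
  have hpow : ((2 ^ w : Nat) : Int) = (2:Int) ^ w := by push_cast; ring
  have hK : (0:Int) < 2 ^ w := by positivity
  have hsh : x >>> w = x / 2 ^ w := by rw [Int.shiftRight_eq_div_pow, hpow]
  set K : Int := 2 ^ w with hKdef
  set q : Int := x / K with hq
  have h1 := Int.emod_add_mul_ediv x K
  have h2 := Int.emod_add_mul_ediv q 2
  have hx2 : x = (x % K + q % 2 * K) + (K * 2) * (q / 2) := by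
    linear_combination -h1 - K * h2
  have hr0 : 0 ≤ x % K := Int.emod_nonneg x (by omega)
  have hr1 : x % K < K := Int.emod_lt_of_pos x hK
  have hpow1 : (2:Int) ^ (w + 1) = K * 2 := by rw [pow_succ]
  rw [hpow1, hsh]
  rw [show x % (K * 2) = ((x % K + q % 2 * K) + (K * 2) * (q / 2)) % (K * 2) from by
    rw [← hx2]]
  rw [Int.add_mul_emod_self_left]
  rcases Int.emod_two_eq q with h | h <;>
    rw [h] <;> rw [Int.emod_eq_of_lt (by omega) (by omega)]

theorem pvEmod_sum (x : Int) (w : Nat) :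
    x % 2 ^ w = ∑ b ∈ Finset.range w, pvBit x b * 2 ^ b := by
  induction w with
  | zero => simp
  | succ w ih =>
      rw [Finset.sum_range_succ, ← ih, pvEmod_two_pow_succ]
      have : pvBit x w = (x >>> w) % 2 := by
        rw [← pvBand_shift_one, PySem.Int.band_one, PySem.Int.mod_eq_emod_of_pos (by norm_num)]
      rw [this]

theorem pvBand_mask_sum (x : Int) :
    PySem.Int.band x ((1 <<< 31) - 1) = ∑ b ∈ Finset.range 31, pvBit x b * 2 ^ b := by
  rw [show ((1 <<< 31 : Int) - 1) = (2:Int) ^ 31 - 1 from by decide,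
    pvBand_mask_emod, pvEmod_sum]

theorem pvBit_zero (b : Nat) : pvBit 0 b = 0 := by
  simp [pvBit, show (0:Int).testBit b = (0:Nat).testBit b from rfl]

theorem pvBit_cases (x : Int) (b : Nat) : pvBit x b = 0 ∨ pvBit x b = 1 := by
  unfold pvBit; split <;> simp

-- === prefix / segment xors ===
def pvPfx (arr : List Int) (k : Nat) : Int := (arr.take k).foldl PySem.Int.bxor 0
def pvSeg (arr : List Int) (i k : Nat) : Int := ((arr.drop i).take (k - i)).foldl PySem.Int.bxor 0

theorem pvPfx_succ (arr : List Int) (m : Nat) (h : m < arr.length) :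
    pvPfx arr (m + 1) = PySem.Int.bxor (pvPfx arr m) arr[m] := by
  unfold pvPfx
  rw [List.take_add_one, List.getElem?_eq_getElem h]
  rw [Option.toList_some, List.foldl_append, List.foldl_cons, List.foldl_nil]

theorem pvSeg_self (arr : List Int) (i : Nat) : pvSeg arr i i = 0 := by
  simp [pvSeg]

theorem pvSeg_succ (arr : List Int) (i m : Nat) (hi : i ≤ m) (h : m < arr.length) :
    pvSeg arr i (m + 1) = PySem.Int.bxor (pvSeg arr i m) arr[m] := by
  unfold pvSeg
  rw [show m + 1 - i = (m - i) + 1 by omega, List.take_add_one]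
  have hlt : m - i < (arr.drop i).length := by simp; omega
  rw [List.getElem?_eq_getElem hlt]
  rw [Option.toList_some, List.foldl_append, List.foldl_cons, List.foldl_nil]
  have hidx : (arr.drop i)[m - i] = arr[m] := by
    rw [List.getElem_drop]; congr 1; omega
  rw [hidx]

theorem pvBit_seg (arr : List Int) (b : Nat) (i : Nat) :
    ∀ k, i ≤ k → k ≤ arr.length →
      pvBit (pvSeg arr i k) b = pvBit (PySem.Int.bxor (pvPfx arr i) (pvPfx arr k)) b := by
  intro k
  induction k with
  | zero =>
      intro hi _
      interval_cases i
      simp [pvSeg_self, pvBit_zero]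
  | succ m ih =>
      intro hi hlen
      rcases Nat.lt_or_ge i (m + 1) with hlt | hge
      · have hi' : i ≤ m := by omega
        have hm : m < arr.length := by omega
        rw [pvSeg_succ arr i m hi' hm, pvPfx_succ arr m hm]
        rw [pvBit_bxor, pvBit_bxor, ih hi' (by omega), pvBit_bxor, pvBit_bxor]
        rcases pvBit_cases (pvPfx arr i) b with h1 | h1 <;>
          rcases pvBit_cases (pvPfx arr m) b with h2 | h2 <;>
            rcases pvBit_cases arr[m] b with h3 | h3 <;>
              simp [h1, h2, h3]
      · have : i = m + 1 := by omega
        subst this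
        simp [pvSeg_self, pvBit_zero]

-- === A port pieces ===

-- === counting specs ===
def pvCnt (arr : List Int) (b m : Nat) (p v : Int) : Int :=
  ∑ k ∈ Finset.range (m + 1),
    if ((k % 2 : Nat) : Int) = p ∧ pvBit (pvPfx arr k) b = v then 1 else 0

def pvC (arr : List Int) (b m : Nat) : (Int × Int) × (Int × Int) :=
  ((pvCnt arr b m 0 0, pvCnt arr b m 0 1), (pvCnt arr b m 1 0, pvCnt arr b m 1 1))

def pvOdd (arr : List Int) (b m : Nat) : Int :=
  ∑ k ∈ Finset.range (m + 1), ∑ j ∈ Finset.range k,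
    if j % 2 = k % 2 then pvBit (PySem.Int.bxor (pvPfx arr j) (pvPfx arr k)) b else 0

def pvEven (arr : List Int) (b m : Nat) : Int :=
  ∑ k ∈ Finset.range (m + 1), ∑ j ∈ Finset.range k,
    if j % 2 = k % 2 then 0 else pvBit (PySem.Int.bxor (pvPfx arr j) (pvPfx arr k)) b

theorem pvParity_band (m : Nat) :
    PySem.Int.band ((m : Int) + 1) 1 = (((m + 1) % 2 : Nat) : Int) := by
  rw [PySem.Int.band_one, show ((m : Int) + 1) = (((m + 1 : Nat)) : Int) by push_cast; ring,
    show (2:Int) = ((2:Nat) : Int) from rfl, PySem.Int.mod_natCast]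

theorem pvOdd_tail (arr : List Int) (b m : Nat) :
    (∑ j ∈ Finset.range (m + 1),
        if j % 2 = (m + 1) % 2 then pvBit (PySem.Int.bxor (pvPfx arr j) (pvPfx arr (m + 1))) b else 0)
      = pvCnt arr b m ((((m + 1) % 2 : Nat)) : Int) (1 - pvBit (pvPfx arr (m + 1)) b) := by
  unfold pvCnt
  apply Finset.sum_congr rfl
  intro j _
  rw [pvBit_bxor]
  by_cases hpar : j % 2 = (m + 1) % 2 <;>
    rcases pvBit_cases (pvPfx arr j) b with h1 | h1 <;>
      rcases pvBit_cases (pvPfx arr (m + 1)) b with h2 | h2 <;>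
        simp [h1, h2, hpar] <;> omega

theorem pvEven_tail (arr : List Int) (b m : Nat) :
    (∑ j ∈ Finset.range (m + 1),
        if j % 2 = (m + 1) % 2 then 0 else pvBit (PySem.Int.bxor (pvPfx arr j) (pvPfx arr (m + 1))) b)
      = pvCnt arr b m (1 - (((m + 1) % 2 : Nat) : Int)) (1 - pvBit (pvPfx arr (m + 1)) b) := by
  unfold pvCnt
  apply Finset.sum_congr rfl
  intro j _
  rw [pvBit_bxor]
  rcases Nat.mod_two_eq_zero_or_one j with hj | hj <;>
    rcases Nat.mod_two_eq_zero_or_one (m + 1) with hm | hm <;>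
      rcases pvBit_cases (pvPfx arr j) b with h1 | h1 <;>
        rcases pvBit_cases (pvPfx arr (m + 1)) b with h2 | h2 <;>
          simp [h1, h2, hj, hm]

theorem pvCnt_succ (arr : List Int) (b m : Nat) (p v : Int) :
    pvCnt arr b (m + 1) p v
      = pvCnt arr b m p v
        + (if (((m + 1) % 2 : Nat) : Int) = p ∧ pvBit (pvPfx arr (m + 1)) b = v then 1 else 0) :=
  Finset.sum_range_succ _ _

theorem pvOdd_succ (arr : List Int) (b m : Nat) :
    pvOdd arr b (m + 1)
      = pvOdd arr b m + ∑ j ∈ Finset.range (m + 1),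
          (if j % 2 = (m + 1) % 2 then pvBit (PySem.Int.bxor (pvPfx arr j) (pvPfx arr (m + 1))) b else 0) := by
  unfold pvOdd
  exact Finset.sum_range_succ _ _

theorem pvEven_succ (arr : List Int) (b m : Nat) :
    pvEven arr b (m + 1)
      = pvEven arr b m + ∑ j ∈ Finset.range (m + 1),
          (if j % 2 = (m + 1) % 2 then 0 else pvBit (PySem.Int.bxor (pvPfx arr j) (pvPfx arr (m + 1))) b) := by
  unfold pvEven
  exact Finset.sum_range_succ _ _

theorem pvInnerA_inv (arr : List Int) (b : Nat) :
    ∀ m, m ≤ arr.length →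
      (PySem.List.pyRange 0 (m : Int) 1).foldl (pvStepA arr (b : Int)) (((1, 0), (0, 0)), 0, 0, 0)
        = (pvC arr b m, pvPfx arr m, pvOdd arr b m, pvEven arr b m) := by
  intro m
  induction m with
  | zero =>
      intro _
      rw [show ((0 : Nat) : Int) = 0 from rfl, PySem.List.pyRange_one_eq_nil (le_refl 0),
        List.foldl_nil]
      have hcnt : ∀ p v : Int, pvCnt arr b 0 p v = if 0 = p ∧ 0 = v then 1 else 0 := by
        intro p v
        simp [pvCnt, pvBit_zero, show pvPfx arr 0 = 0 from rfl]
      have hO : pvOdd arr b 0 = 0 := by simp [pvOdd]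
      have hE : pvEven arr b 0 = 0 := by simp [pvEven]
      rw [pvC, hcnt, hcnt, hcnt, hcnt, hO, hE, show pvPfx arr 0 = 0 from rfl]
      norm_num
  | succ m ih =>
      intro hm
      have hm' : m ≤ arr.length := by omega
      have hlt : m < arr.length := by omega
      rw [show ((m + 1 : Nat) : Int) = (m : Int) + 1 by push_cast; ring,
        PySem.List.pyRange_one_succ_right (by positivity), List.foldl_append,
        List.foldl_cons, List.foldl_nil, ih hm']
      simp only [pvStepA, PySem.List.pyGetD_natCast, Int.toNat_natCast]
      rw [List.getD_eq_getElem arr 0 hlt]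
      rw [show PySem.Int.bxor (pvC arr b m, pvPfx arr m, pvOdd arr b m, pvEven arr b m).2.1 arr[m]
            = pvPfx arr (m + 1) from (pvPfx_succ arr m hlt).symm]
      rw [pvParity_band, pvBand_shift_one]
      simp only [Prod.mk.injEq]
      refine ⟨?_, trivial, ?_, ?_⟩
      · show pvCInc (pvC arr b m, pvPfx arr m, pvOdd arr b m, pvEven arr b m).1 _ _ = pvC arr b (m + 1)
        rcases Nat.mod_two_eq_zero_or_one (m + 1) with hp | hp <;>
          rcases pvBit_cases (pvPfx arr (m + 1)) b with hb | hb <;>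
            · rw [hp, hb]
              unfold pvC pvCInc
              norm_num [pvCnt_succ, hp, hb]
      · show pvOdd arr b m + pvCGet _ _ _ = pvOdd arr b (m + 1)
        rw [pvOdd_succ, pvOdd_tail]
        rcases Nat.mod_two_eq_zero_or_one (m + 1) with hp | hp <;>
          rcases pvBit_cases (pvPfx arr (m + 1)) b with hb | hb <;>
            · rw [hp, hb]
              unfold pvC pvCGet
              norm_num
      · show pvEven arr b m + pvCGet _ _ _ = pvEven arr b (m + 1)
        rw [pvEven_succ, pvEven_tail]
        rcases Nat.mod_two_eq_zero_or_one (m + 1) with hp | hp <;>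
          rcases pvBit_cases (pvPfx arr (m + 1)) b with hb | hb <;>
            · rw [hp, hb]
              unfold pvC pvCGet
              norm_num

theorem pvOne_shiftLeft (β : Nat) : (1:Int) <<< β = 2 ^ β := by
  induction β with
  | zero => rfl
  | succ k ih => rw [pow_succ, ← ih]; simp [Int.shiftLeft_succ]

theorem pvGoldenA_sum (arr : List Int) :
    golden_value arr
      = ∑ β ∈ Finset.range 31,
          (pvEven arr β arr.length - pvOdd arr β arr.length) * 2 ^ β := by
  unfold golden_value
  rw [show (31:Int) = ((31:Nat):Int) by norm_num, PySem.List.pyRange_zero_nat, List.foldl_map]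
  have hstep : ∀ (a : Int) (β : Nat),
      a + ((pvInnerA arr (β:Int)).2.2.2 - (pvInnerA arr (β:Int)).2.2.1) * ((1:Int) <<< ((β:Int)).toNat)
        = a + (pvEven arr β arr.length - pvOdd arr β arr.length) * 2 ^ β := by
    intro a β
    rw [show pvInnerA arr (β:Int)
          = (pvC arr β arr.length, pvPfx arr arr.length, pvOdd arr β arr.length, pvEven arr β arr.length) from
        pvInnerA_inv arr β arr.length (le_refl _)]
    rw [Int.toNat_natCast, pvOne_shiftLeft]
  rw [PySem.List.foldl_congr_mem (List.range 31) _
    (fun answer β => answer + (pvEven arr β arr.length - pvOdd arr β arr.length) * 2 ^ β) 0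
    (fun a x _ => hstep a x)]
  rw [PySem.List.foldl_add (List.range 31)
    (fun β => (pvEven arr β arr.length - pvOdd arr β arr.length) * 2 ^ β) 0, zero_add]
  rfl

def pvS (arr : List Int) (i m : Nat) : Int :=
  ∑ k ∈ Finset.range (m + 1),
    if i < k then (if i % 2 = k % 2 then (-1:Int) else 1) * PySem.Int.band (pvSeg arr i k) pvMaskB
    else 0

theorem pvS_self (arr : List Int) (i : Nat) : pvS arr i i = 0 := by
  unfold pvS
  apply Finset.sum_eq_zero
  intro k hk
  rw [if_neg]
  simp only [Finset.mem_range] at hk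
  omega

theorem pvS_succ (arr : List Int) (i m : Nat) (hi : i ≤ m) :
    pvS arr i (m + 1)
      = pvS arr i m
        + (if i % 2 = (m + 1) % 2 then (-1:Int) else 1) * PySem.Int.band (pvSeg arr i (m + 1)) pvMaskB := by
  unfold pvS
  rw [Finset.sum_range_succ, if_pos (by omega)]

theorem pvInnerB_inv (arr : List Int) (i : Nat) (ans : Int) :
    ∀ m, i ≤ m → m ≤ arr.length →
      (PySem.List.pyRange (i : Int) (m : Int) 1).foldl (pvStepB arr (i : Int)) (0, ans)
        = (pvSeg arr i m, ans + pvS arr i m) := by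
  intro m
  induction m with
  | zero =>
      intro hi _
      have : i = 0 := by omega
      subst this
      rw [show ((0:Nat):Int) = 0 from rfl, PySem.List.pyRange_one_eq_nil (le_refl 0), List.foldl_nil,
        pvSeg_self, pvS_self, add_zero]
  | succ m ih =>
      intro hi hm
      rcases Nat.lt_or_ge i (m + 1) with hlt | hge
      · have hi' : i ≤ m := by omega
        have hmlt : m < arr.length := by omega
        rw [show ((m + 1 : Nat) : Int) = (m : Int) + 1 by push_cast; ring,
          PySem.List.pyRange_one_succ_right (by exact_mod_cast hi'), List.foldl_append,
          List.foldl_cons, List.foldl_nil, ih hi' (by omega)]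
        simp only [pvStepB]
        rw [PySem.List.pyGetD_natCast, List.getD_eq_getElem arr 0 hmlt]
        rw [show PySem.Int.bxor (pvSeg arr i m, ans + pvS arr i m).1 arr[m] = pvSeg arr i (m + 1) from
          (pvSeg_succ arr i m hi' hmlt).symm]
        have hcond : (PySem.Int.mod ((m:Int) - (i:Int) + 1) 2 = 1) ↔ ¬ (i % 2 = (m + 1) % 2) := by
          rw [show ((m:Int) - (i:Int) + 1) = ((m - i + 1 : Nat) : Int) by push_cast [hi']; ring,
            show (2:Int) = ((2:Nat):Int) from rfl, PySem.Int.mod_natCast]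
          constructor
          · intro h
            have : (m - i + 1) % 2 = 1 := by exact_mod_cast h
            omega
          · intro h
            have h2 : (m - i + 1) % 2 = 1 := by omega
            rw [h2]; rfl
        rw [pvS_succ arr i m hi']
        by_cases hpar : i % 2 = (m + 1) % 2
        · have h1 : ¬ (PySem.Int.mod ((m:Int) - (i:Int) + 1) 2 = 1) := by
            rw [hcond]; exact not_not_intro hpar
          rw [if_neg h1, if_pos hpar]
          simp only [Prod.mk.injEq]
          exact ⟨trivial, by ring⟩
        · have h1 : PySem.Int.mod ((m:Int) - (i:Int) + 1) 2 = 1 := hcond.mpr hpar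
          rw [if_pos h1, if_neg hpar]
          simp only [Prod.mk.injEq]
          exact ⟨trivial, by ring⟩
      · have : i = m + 1 := by omega
        subst this
        rw [show ((m + 1 : Nat) : Int) = ((m:Int) + 1) by push_cast; ring,
          PySem.List.pyRange_one_eq_nil (le_refl _), List.foldl_nil, pvSeg_self, pvS_self, add_zero]

theorem pvGoldenAlt_sum (arr : List Int) :
    golden_value_alt arr = ∑ i ∈ Finset.range arr.length, pvS arr i arr.length := by
  unfold golden_value_alt
  rw [PySem.List.pyRange_zero_nat, List.foldl_map]
  rw [PySem.List.foldl_congr_mem (List.range arr.length) _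
    (fun answer i => answer + pvS arr i arr.length) 0 ?_]
  · rw [PySem.List.foldl_add (List.range arr.length) (fun i => pvS arr i arr.length) 0, zero_add]
    rfl
  · intro acc x hx
    have hxlt : x < arr.length := List.mem_range.mp hx
    rw [pvInnerB_inv arr x acc arr.length (by omega) (le_refl _)]

theorem pvBand_maskB_sum (x : Int) :
    PySem.Int.band x pvMaskB = ∑ β ∈ Finset.range 31, pvBit x β * 2 ^ β := by
  unfold pvMaskB
  exact pvBand_mask_sum x

theorem pvBand_seg (arr : List Int) (j k : Nat) (hj : j ≤ k) (hk : k ≤ arr.length) :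
    PySem.Int.band (pvSeg arr j k) pvMaskB
      = PySem.Int.band (PySem.Int.bxor (pvPfx arr j) (pvPfx arr k)) pvMaskB := by
  rw [pvBand_maskB_sum, pvBand_maskB_sum]
  exact Finset.sum_congr rfl (fun β _ => by rw [pvBit_seg arr β j k hj hk])

theorem pvEvenOdd (arr : List Int) (b n : Nat) :
    pvEven arr b n - pvOdd arr b n
      = ∑ k ∈ Finset.range (n + 1), ∑ j ∈ Finset.range k,
          (if j % 2 = k % 2 then (-1:Int) else 1)
            * pvBit (PySem.Int.bxor (pvPfx arr j) (pvPfx arr k)) b := by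
  unfold pvEven pvOdd
  rw [← Finset.sum_sub_distrib]
  apply Finset.sum_congr rfl; intro k _
  rw [← Finset.sum_sub_distrib]
  apply Finset.sum_congr rfl; intro j _
  split_ifs <;> ring

theorem pvSwap (F : Nat → Nat → Int) :
    ∀ n, (∑ k ∈ Finset.range (n + 1), ∑ j ∈ Finset.range k, F j k)
      = ∑ i ∈ Finset.range n, ∑ k ∈ Finset.range (n + 1), (if i < k then F i k else 0) := by
  intro n
  induction n with
  | zero => simp
  | succ n ih =>
      rw [Finset.sum_range_succ (fun k => ∑ j ∈ Finset.range k, F j k) (n + 1), ih]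
      have hsplit : ∀ i ∈ Finset.range (n + 1),
          (∑ k ∈ Finset.range (n + 2), (if i < k then F i k else 0))
            = (∑ k ∈ Finset.range (n + 1), (if i < k then F i k else 0)) + F i (n + 1) := by
        intro i hi
        rw [Finset.sum_range_succ, if_pos (by simp only [Finset.mem_range] at hi; omega)]
      rw [Finset.sum_congr rfl hsplit, Finset.sum_add_distrib]
      rw [Finset.sum_range_succ (fun i => ∑ k ∈ Finset.range (n + 1), (if i < k then F i k else 0)) n]
      have hzero : (∑ k ∈ Finset.range (n + 1), (if n < k then F n k else 0)) = 0 := by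
        apply Finset.sum_eq_zero
        intro k hk
        rw [if_neg (by simp only [Finset.mem_range] at hk; omega)]
      rw [hzero, add_zero]

theorem pvA_pairs (arr : List Int) :
    golden_value arr
      = ∑ k ∈ Finset.range (arr.length + 1), ∑ j ∈ Finset.range k,
          (if j % 2 = k % 2 then (-1:Int) else 1) * PySem.Int.band (pvSeg arr j k) pvMaskB := by
  rw [pvGoldenA_sum]
  calc ∑ β ∈ Finset.range 31, (pvEven arr β arr.length - pvOdd arr β arr.length) * 2 ^ β
      = ∑ β ∈ Finset.range 31, ∑ k ∈ Finset.range (arr.length + 1), ∑ j ∈ Finset.range k,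
          ((if j % 2 = k % 2 then (-1:Int) else 1)
            * pvBit (PySem.Int.bxor (pvPfx arr j) (pvPfx arr k)) β) * 2 ^ β := by
        apply Finset.sum_congr rfl; intro β _
        rw [pvEvenOdd, Finset.sum_mul]
        apply Finset.sum_congr rfl; intro k _
        rw [Finset.sum_mul]
    _ = ∑ k ∈ Finset.range (arr.length + 1), ∑ j ∈ Finset.range k, ∑ β ∈ Finset.range 31,
          ((if j % 2 = k % 2 then (-1:Int) else 1)
            * pvBit (PySem.Int.bxor (pvPfx arr j) (pvPfx arr k)) β) * 2 ^ β := by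
        rw [Finset.sum_comm]
        apply Finset.sum_congr rfl; intro k _
        rw [Finset.sum_comm]
    _ = ∑ k ∈ Finset.range (arr.length + 1), ∑ j ∈ Finset.range k,
          (if j % 2 = k % 2 then (-1:Int) else 1) * PySem.Int.band (pvSeg arr j k) pvMaskB := by
        apply Finset.sum_congr rfl; intro k hk
        apply Finset.sum_congr rfl; intro j hj
        have hk' : k ≤ arr.length := by simp only [Finset.mem_range] at hk; omega
        have hj' : j ≤ k := le_of_lt (Finset.mem_range.mp hj)
        calc ∑ β ∈ Finset.range 31,
              ((if j % 2 = k % 2 then (-1:Int) else 1)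
                * pvBit (PySem.Int.bxor (pvPfx arr j) (pvPfx arr k)) β) * 2 ^ β
            = (if j % 2 = k % 2 then (-1:Int) else 1)
                * ∑ β ∈ Finset.range 31,
                    pvBit (PySem.Int.bxor (pvPfx arr j) (pvPfx arr k)) β * 2 ^ β := by
              rw [Finset.mul_sum]
              apply Finset.sum_congr rfl; intro β _
              ring
          _ = (if j % 2 = k % 2 then (-1:Int) else 1) * PySem.Int.band (pvSeg arr j k) pvMaskB := by
              rw [← pvBand_maskB_sum, pvBand_seg arr j k hj' hk']

theorem pvMain (arr : List Int) : golden_value arr = golden_value_alt arr := by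
  rw [pvA_pairs, pvGoldenAlt_sum,
    pvSwap (fun j k => (if j % 2 = k % 2 then (-1:Int) else 1) * PySem.Int.band (pvSeg arr j k) pvMaskB)
      arr.length]
  apply Finset.sum_congr rfl
  intro i _
  rfl

-- ===== VERDICT (by name: the statement is the Claim_ definition above) =====
theorem golden_value_spec : Claim_equal_golden_value := by
  intro arr _
  unfold Spec_golden_value
  exact pvMain arr
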